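-- pv_equiv track=rewrite | github.com/almehj/project-euler | problem0100/root_tests.py | partial_digital_root
-- ===== SOURCE A (Python) =====
-- def partial_digital_root(n):
--
--     answer = 0
--
--     while n > 0:
--         d = n%10
--         if d != 9:
--             answer += d
--         n //= 10
--
--     return answer
-- ===== SOURCE B (Python) =====
-- def partial_digital_root(n):
--     if n <= 0:
--         return 0
--     return sum(int(c) for c in str(n) if c != '9')
-- ===== Notes on version B (the rewrite author's own statement) =====
-- stated objective: idiomatic
-- what changed: Replaces the arithmetic digit-extraction loop (repeated modulo and floor division) with a sum over the characters of the decimal string representation, skipping the digit nine.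
import Mathlib
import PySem

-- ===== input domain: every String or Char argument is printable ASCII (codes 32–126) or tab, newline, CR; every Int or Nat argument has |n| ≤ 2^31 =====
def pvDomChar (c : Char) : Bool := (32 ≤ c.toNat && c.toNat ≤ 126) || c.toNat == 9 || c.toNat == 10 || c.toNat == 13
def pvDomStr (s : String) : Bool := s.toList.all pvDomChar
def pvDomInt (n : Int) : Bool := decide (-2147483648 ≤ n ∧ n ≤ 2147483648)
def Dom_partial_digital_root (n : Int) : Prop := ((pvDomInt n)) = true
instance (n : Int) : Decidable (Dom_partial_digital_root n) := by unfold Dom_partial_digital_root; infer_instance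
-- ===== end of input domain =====

-- B sums the digit characters of str(n) (skipping '9') instead of A's %10,//10 extraction loop; idiomatic, same cost.

-- ===== PORT A =====
-- the while-loop of A: state (n, answer)
def pdrLoop (n answer : Int) : Int :=
  if 0 < n then
    let d := PySem.Int.mod n 10
    pdrLoop (PySem.Int.floordiv n 10) (if d ≠ 9 then answer + d else answer)
  else answer
termination_by n.toNat
decreasing_by
  have h10 : PySem.Int.floordiv n 10 = n / 10 := PySem.Int.floordiv_eq_ediv_of_pos (by omega)
  rw [h10]; omega

def partial_digital_root (n : Int) : Int := pdrLoop n 0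

-- ===== PORT B =====
-- sum(int(c) for c in str(n) if c != '9'); int(c) on a digit char ported as (c.toNat - 48 : Int) (exact for '0'..'9')
def partial_digital_root_alt (n : Int) : Int :=
  if n ≤ 0 then 0
  else ((PySem.Int.toStr n).toList.filter (fun c => c ≠ '9')).foldl
         (fun a c => a + ((c.toNat : Int) - 48)) 0

-- ===== PRECONDITION & SPEC =====
def Spec_partial_digital_root (n : Int) (out : Int) : Prop := out = partial_digital_root_alt n
instance (n : Int) (out : Int) : Decidable (Spec_partial_digital_root n out) := by unfold Spec_partial_digital_root; infer_instance

-- ===== CLAIM (what is proved, stated in full; the proofs are below) =====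
def Claim_equal_partial_digital_root : Prop := ∀ (n : Int), Dom_partial_digital_root n → Spec_partial_digital_root n (partial_digital_root n)

-- ===== LEMMAS AND PROOFS =====

-- common reference: sum of decimal digits of m, skipping 9s
def S (m : Nat) : Int :=
  if m = 0 then 0
  else (if m % 10 ≠ 9 then ((m % 10 : Nat) : Int) else 0) + S (m / 10)
decreasing_by exact Nat.div_lt_self (by omega) (by omega)

def gsum (cs : List Char) : Int :=
  ((cs.filter (fun c => c ≠ '9')).map (fun c => ((c.toNat : Int) - 48))).sum

theorem S_pos (m : Nat) (hm : 0 < m) :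
    S m = (if m % 10 ≠ 9 then ((m % 10 : Nat) : Int) else 0) + S (m / 10) := by
  rw [S, if_neg (by omega)]

theorem pdrLoop_eq_S (m : Nat) : ∀ (n a : Int), n.toNat = m → pdrLoop n a = a + S m := by
  induction m using Nat.strong_induction_on with
  | _ m ih =>
    intro n a hm
    rw [pdrLoop]
    by_cases h : 0 < n
    · have hn : n = (m : Int) := by omega
      have hmod : PySem.Int.mod n 10 = ((m % 10 : Nat) : Int) := by
        rw [hn]; exact_mod_cast PySem.Int.mod_natCast m 10
      have hdiv : PySem.Int.floordiv n 10 = ((m / 10 : Nat) : Int) := by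
        rw [hn]; exact_mod_cast PySem.Int.floordiv_natCast m 10
      have hmpos : 0 < m := by omega
      have hrec := ih (m / 10) (Nat.div_lt_self hmpos (by omega))
        ((m / 10 : Nat) : Int)
        (if ((m % 10 : Nat) : Int) ≠ 9 then a + ((m % 10 : Nat) : Int) else a) (by omega)
      rw [if_pos h, hmod, hdiv, hrec, S_pos m hmpos]
      by_cases h99 : m % 10 = 9
      · simp [h99]
      · rw [if_pos (by omega : ((m % 10 : Nat) : Int) ≠ 9), if_pos h99]; ring
    · have hm0 : m = 0 := by omega
      rw [if_neg h, hm0, S]; simp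

theorem gsum_toDigitsCore (fuel : Nat) : ∀ (n : Nat) (l : List Char), n < 10 ^ fuel →
    gsum (Nat.toDigitsCore 10 fuel n l) = S n + gsum l := by
  induction fuel with
  | zero => intro n l hn; interval_cases n; rw [S]; simp [Nat.toDigitsCore]
  | succ fuel ih =>
    intro n l hn
    have hd9 : ∀ k : Nat, k < 10 →
        gsum (Nat.digitChar k :: l) = (if k ≠ 9 then (k : Int) else 0) + gsum l := by
      intro k hk
      interval_cases k <;> simp [gsum, Nat.digitChar]
    rw [Nat.toDigitsCore]
    by_cases h : n / 10 = 0
    · have hn10 : n < 10 := by omega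
      rw [if_pos h, hd9 (n % 10) (Nat.mod_lt _ (by omega))]
      by_cases hz : n = 0
      · simp [hz]
        rw [S]; simp
      · conv_rhs => rw [S_pos n (by omega), h]
        rw [Nat.mod_eq_of_lt hn10]
        have hS0 : S 0 = 0 := by rw [S]; simp
        rw [hS0]; ring
    · rw [if_neg h,
          ih (n / 10) _ (by
            have := Nat.pow_pos (n := fuel) (by omega : 0 < 10)
            omega),
          hd9 (n % 10) (Nat.mod_lt _ (by omega))]
      conv_rhs => rw [S_pos n (by omega)]
      ring

theorem foldl_map_sum (v : Char → Int) (cs : List Char) : ∀ (a : Int),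
    cs.foldl (fun a c => a + v c) a = a + (cs.map v).sum := by
  induction cs with
  | nil => intro a; simp
  | cons c cs ih => intro a; simp [ih]; ring

theorem alt_eq_S (n : Int) (h : 0 < n) : partial_digital_root_alt n = S n.toNat := by
  unfold partial_digital_root_alt
  rw [if_neg (by omega)]
  have htc : (PySem.Int.toStr n).toList = Nat.toDigits 10 n.toNat := by
    rw [PySem.Int.toList_toStr, PySem.Int.toChars, if_neg (by omega)]
  rw [htc, foldl_map_sum, zero_add]
  have hb : n.toNat < 10 ^ (n.toNat + 1) :=
    calc n.toNat < 2 ^ n.toNat := Nat.lt_two_pow_self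
    _ ≤ 10 ^ n.toNat := Nat.pow_le_pow_left (by omega) _
    _ ≤ 10 ^ (n.toNat + 1) := Nat.pow_le_pow_right (by omega) (by omega)
  have hgs : gsum (Nat.toDigitsCore 10 (n.toNat + 1) n.toNat []) = S n.toNat := by
    rw [gsum_toDigitsCore (n.toNat + 1) n.toNat [] hb]
    simp [gsum]
  simp only [gsum] at hgs
  rw [Nat.toDigits]
  exact hgs

-- ===== VERDICT (by name: the statement is the Claim_ definition above) =====
theorem partial_digital_root_spec : Claim_equal_partial_digital_root := by
  intro n _
  unfold Spec_partial_digital_root partial_digital_root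
  by_cases h : 0 < n
  · rw [pdrLoop_eq_S n.toNat n 0 rfl, alt_eq_S n h]; ring
  · rw [pdrLoop, if_neg h]
    unfold partial_digital_root_alt
    rw [if_pos (by omega)]
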